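-- pv_equiv track=rewrite | github.com/Dioclei/LeetCode | python/1482_minimum_number_of_days_to_make_m_bouquets.py | is_possible_to_make_bouquets
-- ===== SOURCE A (Python) =====
-- def is_possible_to_make_bouquets(bloomDay, m, k, days):
--     bouquets = 0
--     flowers = 0
--     for flower in bloomDay:
--         if flower <= days:
--             # pick a flower
--             flowers += 1
--         else:
--             flowers = 0
--         if flowers == k:
--             # create a bouquet
--             bouquets += 1
--             flowers = 0
--     if bouquets >= m:
--         return True
--     else:
--         return False
-- ===== SOURCE B (Python) =====
-- def is_possible_to_make_bouquets(bloomDay, m, k, days):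
--     # Collect the lengths of maximal runs of bloomed flowers, then each
--     # run of length r contributes r // k bouquets.
--     runs = []
--     cur = 0
--     for f in bloomDay:
--         if f <= days:
--             cur += 1
--         elif cur:
--             runs.append(cur)
--             cur = 0
--     if cur:
--         runs.append(cur)
--     return sum(r // k for r in runs) >= m
-- ===== Notes on version B (the rewrite author's own statement) =====
-- stated objective: alternative
-- what changed: B replaces A's per-flower counter that is reset both on a non-bloomed flower and on reaching k by a two-phase computation: first collect the lengths of maximal runs of bloomed flowers, then sum r // k over the runs and compare with m.
-- outside the precondition, e.g. on is_possible_to_make_bouquets([2], 0, 0, 5): A returns True, B raises ZeroDivisionError; on is_possible_to_make_bouquets([1], 0, -1, 1): A returns True, B returns False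
import Mathlib
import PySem

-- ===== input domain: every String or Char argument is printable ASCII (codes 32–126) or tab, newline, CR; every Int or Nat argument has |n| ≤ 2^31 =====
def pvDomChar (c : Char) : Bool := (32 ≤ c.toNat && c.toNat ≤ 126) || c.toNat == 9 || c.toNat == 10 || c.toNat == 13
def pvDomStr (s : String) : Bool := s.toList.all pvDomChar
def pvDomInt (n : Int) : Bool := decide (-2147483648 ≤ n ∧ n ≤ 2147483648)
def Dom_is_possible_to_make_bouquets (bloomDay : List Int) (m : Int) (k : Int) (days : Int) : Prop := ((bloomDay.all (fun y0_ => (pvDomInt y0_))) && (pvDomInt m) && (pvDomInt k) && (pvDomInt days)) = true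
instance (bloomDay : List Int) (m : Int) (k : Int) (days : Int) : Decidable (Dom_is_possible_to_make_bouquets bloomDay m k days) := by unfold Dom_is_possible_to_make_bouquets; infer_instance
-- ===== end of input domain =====

-- B computes A's answer by run lengths and floor division instead of A's reset-at-k counter
-- (objective: alternative, same linear cost).

-- ===== PORT A =====
-- A's for-loop over bloomDay carrying (bouquets, flowers).
def pvALoop (k days : Int) : List Int → Int → Int → Int × Int
  | [], bouquets, flowers => (bouquets, flowers)
  | f :: rest, bouquets, flowers =>
    let flowers' := if f ≤ days then flowers + 1 else 0
    if flowers' = k then pvALoop k days rest (bouquets + 1) 0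
    else pvALoop k days rest bouquets flowers'

def is_possible_to_make_bouquets (bloomDay : List Int) (m : Int) (k : Int) (days : Int) : Bool :=
  if (pvALoop k days bloomDay 0 0).1 ≥ m then true else false

-- ===== PORT B =====
-- B's for-loop: collect the lengths of maximal runs of flowers with f ≤ days.
def pvRuns (days : Int) : List Int → Int → List Int
  | [], cur => if cur ≠ 0 then [cur] else []
  | f :: rest, cur =>
    if f ≤ days then pvRuns days rest (cur + 1)
    else if cur ≠ 0 then cur :: pvRuns days rest 0
    else pvRuns days rest 0

def is_possible_to_make_bouquets_alt (bloomDay : List Int) (m : Int) (k : Int) (days : Int) : Bool :=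
  decide ((pvRuns days bloomDay 0).foldl (fun acc r => acc + PySem.Int.floordiv r k) 0 ≥ m)

-- ===== PRECONDITION & SPEC =====
-- Pre_ restricts to the natural domain k ≥ 1 (bouquet size is positive). For k = 0 A still
-- returns a value (an artefact: every non-bloomed flower counts as a bouquet) while B's r // k
-- raises ZeroDivisionError; for k < 0 A's counter never fires, an artefact B does not mimic.
def Pre_is_possible_to_make_bouquets (bloomDay : List Int) (m : Int) (k : Int) (days : Int) : Prop := 1 ≤ k
instance (bloomDay : List Int) (m : Int) (k : Int) (days : Int) : Decidable (Pre_is_possible_to_make_bouquets bloomDay m k days) := by unfold Pre_is_possible_to_make_bouquets; infer_instance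

def pvWitness_is_possible_to_make_bouquets : List Int × Int × Int × Int := ([1, 1, 2], 1, 2, 1)

def Spec_is_possible_to_make_bouquets (bloomDay : List Int) (m : Int) (k : Int) (days : Int) (out : Bool) : Prop := out = is_possible_to_make_bouquets_alt bloomDay m k days
instance (bloomDay : List Int) (m : Int) (k : Int) (days : Int) (out : Bool) : Decidable (Spec_is_possible_to_make_bouquets bloomDay m k days out) := by unfold Spec_is_possible_to_make_bouquets; infer_instance

-- ===== CLAIM (what is proved, stated in full; the proofs are below) =====
def Claim_equal_is_possible_to_make_bouquets : Prop := ∀ (bloomDay : List Int) (m : Int) (k : Int) (days : Int), Dom_is_possible_to_make_bouquets bloomDay m k days → Pre_is_possible_to_make_bouquets bloomDay m k days → Spec_is_possible_to_make_bouquets bloomDay m k days (is_possible_to_make_bouquets bloomDay m k days)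

-- ===== LEMMAS AND PROOFS =====

-- Incrementing a nonnegative counter: quotient and remainder by a positive k.
lemma pv_succ_div_mod (k cur : Int) (hk : 1 ≤ k) :
    (cur % k + 1 = k → ((cur + 1) % k = 0 ∧ (cur + 1) / k = cur / k + 1)) ∧
    (cur % k + 1 ≠ k → ((cur + 1) % k = cur % k + 1 ∧ (cur + 1) / k = cur / k)) := by
  have h := Int.mul_ediv_add_emod cur k
  have h0 : 0 ≤ cur % k := Int.emod_nonneg cur (by omega)
  have h1 : cur % k < k := Int.emod_lt_of_pos cur (by omega)
  constructor
  · intro he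
    have hx : k * (cur / k + 1) = k * (cur / k) + k := by ring
    have hcc : cur + 1 = k * (cur / k + 1) := by omega
    constructor
    · rw [hcc]; exact Int.mul_emod_right k _
    · rw [hcc]; exact Int.mul_ediv_cancel_left _ (by omega)
  · intro he
    have hcc : cur + 1 = (cur % k + 1) + k * (cur / k) := by omega
    constructor
    · rw [hcc, Int.add_mul_emod_self_left, Int.emod_eq_of_lt (by omega) (by omega)]
    · rw [hcc, Int.add_mul_ediv_left _ _ (show k ≠ 0 by omega),
          Int.ediv_eq_zero_of_lt (by omega) (by omega), zero_add]

-- Invariant tying A's (bouquets, flowers) state to B's run list: with cur the length of the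
-- current run so far, A's flowers is cur % k and its final bouquet count is bq plus the runs'
-- contribution minus the cur / k bouquets already counted inside bq.
lemma pv_loop_runs (k days : Int) (hk : 1 ≤ k) :
    ∀ (l : List Int) (bq cur : Int), 0 ≤ cur →
      (pvALoop k days l bq (cur % k)).1
        = bq - cur / k + ((pvRuns days l cur).map (fun r => r / k)).sum := by
  intro l
  induction l with
  | nil =>
    intro bq cur hc
    by_cases h : cur = 0 <;>
      simp [pvALoop, pvRuns, h]
  | cons f rest ih =>
    intro bq cur hc
    have hsm := pv_succ_div_mod k cur hk
    by_cases hf : f ≤ days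
    · by_cases he : cur % k + 1 = k
      · obtain ⟨hm, hd⟩ := hsm.1 he
        have := ih (bq + 1) (cur + 1) (by omega)
        simp only [pvALoop, pvRuns, hf, if_pos, he] at *
        rw [hm] at this
        rw [this, hd]; ring
      · obtain ⟨hm, hd⟩ := hsm.2 he
        have := ih bq (cur + 1) (by omega)
        simp only [pvALoop, pvRuns, hf, if_true, if_neg he] at *
        rw [hm] at this
        rw [this, hd]
    · have hk0 : (0 : Int) ≠ k := by omega
      have hih := ih bq 0 (by omega)
      simp only [Int.zero_emod, Int.zero_ediv, sub_zero] at hih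
      by_cases h0 : cur = 0
      · subst h0
        simp only [pvALoop, pvRuns, hf, if_false, if_neg hk0, ne_eq, not_true_eq_false,
          Int.zero_ediv, sub_zero]
        simpa using hih
      · simp only [pvALoop, pvRuns, hf, if_false, if_neg hk0, ne_eq, h0,
          not_false_eq_true, ite_true, List.map_cons, List.sum_cons]
        rw [hih]
        ring

-- B's foldl of acc + r // k is the sum of the mapped quotients.
lemma pv_foldl_sum (k : Int) (hk : 0 < k) (l : List Int) (a : Int) :
    l.foldl (fun acc r => acc + PySem.Int.floordiv r k) a
      = a + (l.map (fun r => r / k)).sum := by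
  induction l generalizing a with
  | nil => simp
  | cons r rest ih =>
    rw [List.foldl_cons, PySem.Int.floordiv_eq_ediv_of_pos hk, ih]
    simp only [List.map_cons, List.sum_cons]
    ring

-- ===== VERDICT (by name: the statement is the Claim_ definition above) =====
theorem is_possible_to_make_bouquets_spec : Claim_equal_is_possible_to_make_bouquets := by
  intro bloomDay m k days _ hk
  have hk' : 1 ≤ k := hk
  unfold Spec_is_possible_to_make_bouquets is_possible_to_make_bouquets
    is_possible_to_make_bouquets_alt
  have hmain := pv_loop_runs k days hk' bloomDay 0 0 le_rfl
  simp only [Int.zero_emod, Int.zero_ediv, sub_zero, zero_add] at hmain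
  rw [pv_foldl_sum k (by omega), hmain]
  simp
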